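-- pv_equiv track=rewrite | github.com/MOHAMEDVOS/vos-tool | analyzer/rebuttal_detection.py | _strip_polite_closing_suffix
-- ===== SOURCE A (Python) =====
-- def _strip_polite_closing_suffix(text: str) -> str:
--     """Remove polite closing phrases from the end of a candidate phrase."""
--     if not text:
--         return text
--
--     lower = text.lower()
--     closing_keywords = [
--         "thank you",
--         "thanks for your time",
--         "have a good one",
--         "have a great day",
--         "have a nice day",
--         "enjoy your day",
--         "bye",
--         "goodbye",
--         "talk to you later",
--         "take care",
--     ]
--
--     cut_index = len(text)
--     for kw in closing_keywords:
--         idx = lower.find(kw)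
--         if idx != -1 and idx < cut_index:
--             cut_index = idx
--
--     if cut_index == len(text):
--         return text
--
--     return text[:cut_index].strip()
-- ===== SOURCE B (Python) =====
-- def _strip_polite_closing_suffix(text: str) -> str:
--     """Remove polite closing phrases from the end of a candidate phrase."""
--     closing_keywords = (
--         "thank you",
--         "thanks for your time",
--         "have a good one",
--         "have a great day",
--         "have a nice day",
--         "enjoy your day",
--         "bye",
--         "goodbye",
--         "talk to you later",
--         "take care",
--     )
--     lower = text.lower()
--     for i in range(len(lower)):
--         if any(lower.startswith(kw, i) for kw in closing_keywords):
--             return text[:i].strip()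
--     return text
-- ===== Notes on version B (the rewrite author's own statement) =====
-- stated objective: alternative
-- what changed: B replaces A's per-keyword full find with a minimum accumulator by a single left-to-right scan over text positions that stops at the first position where any keyword starts (inverted loop nesting, first-match instead of min-of-finds).
import Mathlib
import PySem

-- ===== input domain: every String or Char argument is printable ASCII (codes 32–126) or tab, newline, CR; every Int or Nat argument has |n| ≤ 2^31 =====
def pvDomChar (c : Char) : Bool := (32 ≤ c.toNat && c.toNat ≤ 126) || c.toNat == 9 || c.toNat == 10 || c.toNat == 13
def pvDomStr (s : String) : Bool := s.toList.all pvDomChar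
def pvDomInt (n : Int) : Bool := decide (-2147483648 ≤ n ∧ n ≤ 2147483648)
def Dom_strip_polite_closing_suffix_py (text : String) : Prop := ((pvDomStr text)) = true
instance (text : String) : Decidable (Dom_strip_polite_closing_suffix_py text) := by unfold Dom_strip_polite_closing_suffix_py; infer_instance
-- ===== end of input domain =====

-- B scans the text left to right and cuts at the first position where any closing keyword
-- starts, instead of running one full find per keyword while tracking a minimum (alternative
-- decomposition, same result).

-- ===== PORT A =====
def closingKeywordsA : List String :=
  ["thank you", "thanks for your time", "have a good one", "have a great day",
   "have a nice day", "enjoy your day", "bye", "goodbye", "talk to you later", "take care"]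

def strip_polite_closing_suffix_py (text : String) : String :=
  if text.toList = [] then text
  else
    let lower := PySem.Str.lower text
    let cutIndex := closingKeywordsA.foldl
      (fun cut kw =>
        let idx := PySem.Str.find lower kw
        if idx ≠ -1 ∧ idx < cut then idx else cut)
      (PySem.Str.len text)
    if cutIndex = PySem.Str.len text then text
    else PySem.Str.strip (PySem.Str.slice text none (some cutIndex))

-- ===== PORT B =====
def closingKeywordsB : List (List Char) :=
  ["thank you".toList, "thanks for your time".toList, "have a good one".toList,
   "have a great day".toList, "have a nice day".toList, "enjoy your day".toList,
   "bye".toList, "goodbye".toList, "talk to you later".toList, "take care".toList]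

-- the 'for i in range(len(lower))' loop: first index i with lower.startswith(kw, i) for some kw
-- (lower.startswith(kw, i) is exactly Chars.startswith on the i-th suffix)
def altFindCut (kws : List (List Char)) : List Char → Nat → Option Nat
  | [], _ => none
  | c :: rest, i =>
    if kws.any (fun kw => PySem.Chars.startswith (c :: rest) kw) then some i
    else altFindCut kws rest (i + 1)

def strip_polite_closing_suffix_py_alt (text : String) : String :=
  match altFindCut closingKeywordsB (PySem.Chars.lower text.toList) 0 with
  | some i => PySem.Str.strip (String.ofList (text.toList.take i))
  | none => text

-- ===== PRECONDITION & SPEC =====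
def Spec_strip_polite_closing_suffix_py (text : String) (out : String) : Prop := out = strip_polite_closing_suffix_py_alt text
instance (text : String) (out : String) : Decidable (Spec_strip_polite_closing_suffix_py text out) := by unfold Spec_strip_polite_closing_suffix_py; infer_instance

-- ===== CLAIM (what is proved, stated in full; the proofs are below) =====
def Claim_equal_strip_polite_closing_suffix_py : Prop := ∀ (text : String), Dom_strip_polite_closing_suffix_py text → Spec_strip_polite_closing_suffix_py text (strip_polite_closing_suffix_py text)

-- ===== LEMMAS AND PROOFS =====

-- "some keyword starts at this suffix"
def anyAt (kws : List (List Char)) (t : List Char) : Prop :=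
  ∃ kw ∈ kws, kw <+: t

-- A's fold body, zeta-reduced, on the char level
def minFold (L : List Char) (kws : List (List Char)) (c : Int) : Int :=
  kws.foldl (fun cut kw =>
    if PySem.Chars.find L kw ≠ -1 ∧ PySem.Chars.find L kw < cut then PySem.Chars.find L kw else cut) c

lemma altFindCut_spec (kws : List (List Char)) (s : List Char) (i : Nat) :
    (altFindCut kws s i = none ∧ ∀ k, k < s.length → ¬ anyAt kws (s.drop k)) ∨
    (∃ k, altFindCut kws s i = some (i + k) ∧ k < s.length ∧ anyAt kws (s.drop k) ∧
      ∀ j, j < k → ¬ anyAt kws (s.drop j)) := by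
  induction s generalizing i with
  | nil => exact Or.inl ⟨rfl, by simp⟩
  | cons c rest ih =>
    by_cases h : kws.any (fun kw => PySem.Chars.startswith (c :: rest) kw) = true
    · refine Or.inr ⟨0, ?_, by simp, ?_, by omega⟩
      · simp [altFindCut, h]
      · rcases List.any_eq_true.mp h with ⟨kw, hkw, hs⟩
        exact ⟨kw, hkw, (PySem.Chars.startswith_iff _ _).mp hs⟩
    · have hno : ¬ anyAt kws (c :: rest) := by
        rintro ⟨kw, hkw, hp⟩
        exact h (List.any_eq_true.mpr ⟨kw, hkw, (PySem.Chars.startswith_iff _ _).mpr hp⟩)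
      rcases ih (i + 1) with ⟨h1, h2⟩ | ⟨k, h1, h2, h3, h4⟩
      · refine Or.inl ⟨by simp [altFindCut, h, h1], ?_⟩
        intro k hk
        cases k with
        | zero => simpa using hno
        | succ k => exact fun hx => h2 k (by simpa using hk) (by simpa using hx)
      · refine Or.inr ⟨k + 1, ?_, by simpa using h2, by simpa using h3, ?_⟩
        · simp [altFindCut, h, h1]; omega
        · intro j hj
          cases j with
          | zero => simpa using hno
          | succ j => exact fun hx => h4 j (by omega) (by simpa using hx)

-- characterisation of A's minimum-tracking fold
lemma foldA_spec (kws : List (List Char)) (L : List Char) (c : Int) (hc : 0 ≤ c) :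
    0 ≤ minFold L kws c ∧ minFold L kws c ≤ c ∧
    (minFold L kws c = c ∨ ∃ kw ∈ kws, PySem.Chars.find L kw = minFold L kws c) ∧
    (∀ kw ∈ kws, PySem.Chars.find L kw ≠ -1 → minFold L kws c ≤ PySem.Chars.find L kw) := by
  induction kws generalizing c with
  | nil => exact ⟨hc, le_refl _, Or.inl rfl, by simp⟩
  | cons kw kws ih =>
    by_cases h : PySem.Chars.find L kw ≠ -1 ∧ PySem.Chars.find L kw < c
    · have hge : 0 ≤ PySem.Chars.find L kw := by
        have := PySem.Chars.neg_one_le_find L kw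
        rcases h with ⟨h1, _⟩
        omega
      have hstep : minFold L (kw :: kws) c = minFold L kws (PySem.Chars.find L kw) := by
        unfold minFold
        rw [List.foldl_cons, if_pos h]
      rcases ih (PySem.Chars.find L kw) hge with ⟨i1, i2, i3, i4⟩
      rw [hstep]
      refine ⟨i1, by omega, ?_, ?_⟩
      · rcases i3 with h3 | ⟨kw', hkw', h3⟩
        · exact Or.inr ⟨kw, by simp, h3.symm⟩
        · exact Or.inr ⟨kw', by simp [hkw'], h3⟩
      · intro kw' hkw' hne
        rcases List.mem_cons.mp hkw' with rfl | hmem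
        · omega
        · exact i4 kw' hmem hne
    · have hstep : minFold L (kw :: kws) c = minFold L kws c := by
        unfold minFold
        rw [List.foldl_cons, if_neg h]
      rcases ih c hc with ⟨i1, i2, i3, i4⟩
      rw [hstep]
      refine ⟨i1, i2, ?_, ?_⟩
      · rcases i3 with h3 | ⟨kw', hkw', h3⟩
        · exact Or.inl h3
        · exact Or.inr ⟨kw', by simp [hkw'], h3⟩
      · intro kw' hkw' hne
        rcases List.mem_cons.mp hkw' with rfl | hmem
        · push Not at h
          have := PySem.Chars.neg_one_le_find L kw'
          have := h hne
          omega
        · exact i4 kw' hmem hne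

lemma kwB_ne_nil : ∀ kw ∈ closingKeywordsB, kw ≠ [] := by decide

lemma kwA_map : closingKeywordsA.map String.toList = closingKeywordsB := by decide

-- if some keyword starts at position j of L, its find is ≥ 0 and ≤ j
lemma find_le_of_prefix_drop (L kw : List Char) (j : Nat) (h : kw <+: L.drop j) :
    0 ≤ PySem.Chars.find L kw ∧ PySem.Chars.find L kw ≤ (j : Int) := by
  have hin : PySem.Chars.isIn kw L = true :=
    (PySem.Chars.exists_prefix_drop_iff_isIn kw L).mp ⟨j, h⟩
  have hnn : 0 ≤ PySem.Chars.find L kw := by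
    rw [PySem.Chars.find_nonneg_iff]
    exact (PySem.Chars.isIn_iff_infix kw L).mp hin
  refine ⟨hnn, ?_⟩
  rcases PySem.Chars.find_spec hnn with ⟨_, hmin⟩
  by_contra hlt
  exact hmin j (by omega) h

lemma length_lower (s : List Char) : (PySem.Chars.lower s).length = s.length := by
  simp [PySem.Chars.lower]

theorem strip_polite_main (text : String) :
    strip_polite_closing_suffix_py text = strip_polite_closing_suffix_py_alt text := by
  unfold strip_polite_closing_suffix_py strip_polite_closing_suffix_py_alt
  by_cases hnil : text.toList = []
  · simp [hnil, PySem.Chars.lower, altFindCut]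
  · simp only [hnil, if_false]
    set L := PySem.Chars.lower text.toList with hL
    have hLlen : L.length = text.toList.length := length_lower _
    set n : Int := (text.toList.length : Int) with hn
    have hlen : PySem.Str.len text = n := by
      simp [PySem.Str.len_eq, hn, String.length_toList]
    -- rewrite A's fold to the char level over closingKeywordsB
    have hfold : closingKeywordsA.foldl
        (fun cut kw =>
          if PySem.Str.find (PySem.Str.lower text) kw ≠ -1 ∧ PySem.Str.find (PySem.Str.lower text) kw < cut
          then PySem.Str.find (PySem.Str.lower text) kw else cut) n
        = minFold L closingKeywordsB n := by
      unfold minFold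
      rw [← kwA_map, List.foldl_map]
      congr 1
      funext cut kw
      simp [PySem.Str.find_eq, hL]
    rcases foldA_spec closingKeywordsB L n (by positivity) with ⟨m0, mle, mcase, mmin⟩
    rcases altFindCut_spec closingKeywordsB L 0 with ⟨b1, b2⟩ | ⟨k, b1, b2, b3, b4⟩
    · -- B finds nothing anywhere: show A's fold result = n
      have hmn : minFold L closingKeywordsB n = n := by
        rcases mcase with h | ⟨kw, hkw, hfind⟩
        · exact h
        · exfalso
          have hnn : 0 ≤ PySem.Chars.find L kw := by rw [hfind]; exact m0
          rcases PySem.Chars.find_spec hnn with ⟨hpre, _⟩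
          have hklt : (PySem.Chars.find L kw).toNat < L.length := by
            have hne := kwB_ne_nil kw hkw
            have hd : L.drop (PySem.Chars.find L kw).toNat ≠ [] := by
              intro h0
              rw [h0] at hpre
              exact hne (List.prefix_nil.mp hpre)
            rw [ne_eq, List.drop_eq_nil_iff] at hd
            omega
          exact b2 _ hklt ⟨kw, hkw, hpre⟩
      rw [b1, hlen, hfold, if_pos hmn]
    · -- B finds first match at k
      rcases b3 with ⟨kw0, hkw0, hpre0⟩
      rcases find_le_of_prefix_drop L kw0 k hpre0 with ⟨hf0, hfle⟩
      have hmlek : minFold L closingKeywordsB n ≤ (k : Int) :=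
        le_trans (mmin kw0 hkw0 (by omega)) hfle
      have hklem : (k : Int) ≤ minFold L closingKeywordsB n := by
        by_contra hlt
        push Not at hlt
        rcases mcase with h | ⟨kw, hkw, hfind⟩
        · rw [h] at hlt
          rw [hn] at hlt
          omega
        · have hnn : 0 ≤ PySem.Chars.find L kw := by rw [hfind]; exact m0
          rcases PySem.Chars.find_spec hnn with ⟨hpre, _⟩
          refine b4 (PySem.Chars.find L kw).toNat (by omega) ⟨kw, hkw, hpre⟩
      have hmk : minFold L closingKeywordsB n = (k : Int) := le_antisymm hmlek hklem
      have hmnen : minFold L closingKeywordsB n ≠ n := by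
        rw [hmk, hn, ← hLlen]
        intro hx
        have : k = L.length := by exact_mod_cast hx
        omega
      have hslice : PySem.Str.slice text none (some (minFold L closingKeywordsB n)) =
          String.ofList (text.toList.take k) := by
        rw [hmk]
        apply String.toList_injective
        simp [PySem.List.slice_to_natCast]
      rw [b1, hlen, hfold]
      simp only [hmnen, if_false]
      rw [hslice]
      simp

-- ===== VERDICT (by name: the statement is the Claim_ definition above) =====
theorem strip_polite_closing_suffix_py_spec : Claim_equal_strip_polite_closing_suffix_py := by
  intro text _
  unfold Spec_strip_polite_closing_suffix_py
  exact strip_polite_main text
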